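-- pv_equiv track=rewrite | github.com/ISE-FIZKarlsruhe/ddbkg | goethe-faust/scripts/analyse_years.py | bucket_counts
-- ===== SOURCE A (Python) =====
-- def bucket_counts(year_counts, size, year_min, year_max):
--     """Aggregate year_counts into buckets of width `size`."""
--     start = (year_min // size) * size
--     end   = ((year_max // size) + 1) * size
--     bins  = {}
--     for b in range(start, end, size):
--         label = f"{b}–{b + size - 1}"
--         bins[label] = sum(year_counts.get(y, 0) for y in range(b, b + size))
--     return bins
-- ===== SOURCE B (Python) =====
-- def bucket_counts(year_counts, size, year_min, year_max):
--     """Aggregate year_counts into buckets of width `size` in one pass over the items."""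
--     start = (year_min // size) * size
--     end = ((year_max // size) + 1) * size
--     bins = {b: 0 for b in range(start, end, size)}
--     for y, c in year_counts.items():
--         if start <= y < end:
--             bins[(y // size) * size] += c
--     return {f"{b}–{b + size - 1}": c for b, c in bins.items()}
-- ===== Notes on version B (the rewrite author's own statement) =====
-- stated objective: alternative
-- what changed: Instead of summing year_counts.get(y,0) over every single year of every bucket, B zero-initialises the buckets once and makes a single pass over the year_counts items, adding each count to the bucket computed by floor division, attaching labels at the end.
-- outside the precondition, e.g. on bucket_counts({1: 2}, -5, 0, 10): A returns {}, B raises KeyError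
import Mathlib
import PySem

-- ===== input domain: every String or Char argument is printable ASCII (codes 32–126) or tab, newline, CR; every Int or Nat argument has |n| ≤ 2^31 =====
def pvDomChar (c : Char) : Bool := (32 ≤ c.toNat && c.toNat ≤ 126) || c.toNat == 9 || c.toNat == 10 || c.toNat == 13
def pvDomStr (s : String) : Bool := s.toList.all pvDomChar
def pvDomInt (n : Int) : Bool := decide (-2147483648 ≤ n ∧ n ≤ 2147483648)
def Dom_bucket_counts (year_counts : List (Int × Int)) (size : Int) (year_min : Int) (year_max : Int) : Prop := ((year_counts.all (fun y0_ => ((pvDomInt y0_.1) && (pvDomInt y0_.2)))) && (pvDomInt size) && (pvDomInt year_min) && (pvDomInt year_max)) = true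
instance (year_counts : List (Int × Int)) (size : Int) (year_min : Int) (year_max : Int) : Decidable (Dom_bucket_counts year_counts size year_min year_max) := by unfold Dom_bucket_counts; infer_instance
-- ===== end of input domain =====

-- B replaces A's per-bucket scan over every single year by zero-initialised buckets and a single
-- pass over the year_counts items (objective: alternative one-pass algorithm).


-- ===== PORT A =====
def bucket_counts (year_counts : List (Int × Int)) (size : Int) (year_min : Int) (year_max : Int) : List (String × Int) :=
  let start := PySem.Int.floordiv year_min size * size
  let stop := (PySem.Int.floordiv year_max size + 1) * size
  let bins : PySem.Dict String Int :=
    (PySem.List.pyRange start stop size).foldl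
      (fun bins b =>
        bins.insert (PySem.Int.toStr b ++ "–" ++ PySem.Int.toStr (b + size - 1))
          ((PySem.List.pyRange b (b + size) 1).foldl
            (fun acc y => acc + (PySem.Dict.mk year_counts).getD y 0) 0))
      PySem.Dict.empty
  bins.items

-- ===== PORT B =====
def bucket_counts_alt (year_counts : List (Int × Int)) (size : Int) (year_min : Int) (year_max : Int) : List (String × Int) :=
  let start := PySem.Int.floordiv year_min size * size
  let stop := (PySem.Int.floordiv year_max size + 1) * size
  let bins0 : PySem.Dict Int Int :=
    (PySem.List.pyRange start stop size).foldl (fun d b => d.insert b 0) PySem.Dict.empty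
  let bins :=
    year_counts.foldl
      (fun (d : PySem.Dict Int Int) p =>
        if start ≤ p.1 ∧ p.1 < stop then
          d.modify (PySem.Int.floordiv p.1 size * size) 0 (· + p.2)
        else d)
      bins0
  (bins.items.foldl
      (fun (d : PySem.Dict String Int) p =>
        d.insert (PySem.Int.toStr p.1 ++ "–" ++ PySem.Int.toStr (p.1 + size - 1)) p.2)
      PySem.Dict.empty).items

-- ===== PRECONDITION & SPEC =====
-- Pre_ excludes size ≤ 0 (size = 0 raises ZeroDivisionError in A, and for negative size A's buckets are a
-- degenerate all-zero or empty artefact, on which B may raise KeyError) and association lists with duplicate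
-- keys, which cannot arise from the Python dict argument and on which first-match vs iteration semantics diverge.
def Pre_bucket_counts (year_counts : List (Int × Int)) (size : Int) (year_min : Int) (year_max : Int) : Prop :=
  1 ≤ size ∧ (year_counts.map Prod.fst).Nodup
instance (year_counts : List (Int × Int)) (size : Int) (year_min : Int) (year_max : Int) : Decidable (Pre_bucket_counts year_counts size year_min year_max) := by unfold Pre_bucket_counts; infer_instance
def pvWitness_bucket_counts : (List (Int × Int)) × Int × Int × Int := ([(2001, 3), (2007, 1)], 5, 2001, 2007)

def Spec_bucket_counts (year_counts : List (Int × Int)) (size : Int) (year_min : Int) (year_max : Int) (out : List (String × Int)) : Prop := out = bucket_counts_alt year_counts size year_min year_max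
instance (year_counts : List (Int × Int)) (size : Int) (year_min : Int) (year_max : Int) (out : List (String × Int)) : Decidable (Spec_bucket_counts year_counts size year_min year_max out) := by unfold Spec_bucket_counts; infer_instance

-- ===== CLAIM (what is proved, stated in full; the proofs are below) =====
def Claim_equal_bucket_counts : Prop := ∀ (year_counts : List (Int × Int)) (size : Int) (year_min : Int) (year_max : Int), Dom_bucket_counts year_counts size year_min year_max → Pre_bucket_counts year_counts size year_min year_max → Spec_bucket_counts year_counts size year_min year_max (bucket_counts year_counts size year_min year_max)

-- ===== LEMMAS AND PROOFS =====

-- the per-bucket total B computes: sum of the counts of the keys lying in [b, b+size)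
def pvS (t : List (Int × Int)) (b size : Int) : Int :=
  (t.map (fun p => if b ≤ p.1 ∧ p.1 < b + size then p.2 else 0)).sum

theorem pv_sum_ite (k v : Int) (g : Int → Int) (R : List Int) (hR : R.Nodup) (hg : g k = 0) :
    (R.map (fun y => if k = y then v else g y)).sum = (if k ∈ R then v else 0) + (R.map g).sum := by
  induction R with
  | nil => simp
  | cons a t ih =>
    rcases List.nodup_cons.mp hR with ⟨ha, ht⟩
    by_cases hk : k = a
    · subst hk
      have hmap : t.map (fun y => if k = y then v else g y) = t.map g :=
        List.map_congr_left (fun y hy => by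
          have : k ≠ y := fun h => ha (h ▸ hy)
          simp [this])
      simp [hmap, hg]
    · have hmem : (k ∈ a :: t) = (k ∈ t) := by
        simp [List.mem_cons, hk]
      simp only [List.map_cons, List.sum_cons, if_neg hk, ih ht, hmem]
      ring

theorem pv_inner (year_counts : List (Int × Int)) (hnd : (year_counts.map Prod.fst).Nodup) (b size : Int) :
    (PySem.List.pyRange b (b + size) 1).foldl
      (fun acc y => acc + (PySem.Dict.mk year_counts).getD y 0) 0 = pvS year_counts b size := by
  rw [PySem.List.foldl_add]
  induction year_counts with
  | nil =>
    have h0 : ∀ y : Int, (PySem.Dict.mk ([] : List (Int × Int))).getD y 0 = 0 := fun y => rfl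
    simp [pvS, h0]
  | cons p t ih =>
    rcases List.nodup_cons.mp hnd with ⟨hp, ht⟩
    have hget : ∀ y : Int, (PySem.Dict.mk (p :: t)).getD y 0 =
        if p.1 = y then p.2 else (PySem.Dict.mk t).getD y 0 := by
      intro y
      rw [PySem.Dict.getD_eq_get?_getD, PySem.Dict.get?_mk_cons]
      by_cases h : p.1 = y <;> simp [h, PySem.Dict.getD_eq_get?_getD]
    have hgk : (PySem.Dict.mk t).getD p.1 0 = 0 := by
      apply PySem.Dict.getD_of_not_contains
      rcases h : (PySem.Dict.mk t).contains p.1 with _ | _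
      · rfl
      · exact absurd ((PySem.Dict.contains_iff_mem_keys _ _).mp h) (by simpa using hp)
    have hrw : (PySem.List.pyRange b (b + size) 1).map
          (fun y => (PySem.Dict.mk (p :: t)).getD y 0) =
        (PySem.List.pyRange b (b + size) 1).map
          (fun y => if p.1 = y then p.2 else (PySem.Dict.mk t).getD y 0) :=
      List.map_congr_left (fun y _ => hget y)
    rw [hrw, pv_sum_ite p.1 p.2 _ _ (PySem.List.nodup_pyRange_one b (b + size)) hgk]
    have hm : (p.1 ∈ PySem.List.pyRange b (b + size) 1) ↔ (b ≤ p.1 ∧ p.1 < b + size) :=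
      PySem.List.mem_pyRange_one
    have iht := ih ht
    simp only [pvS] at iht
    simp only [pvS, List.map_cons, List.sum_cons]
    simp only [hm]
    linarith [iht]

theorem pv_nodup_bl (start stop size : Int) (h : 0 < size) :
    (PySem.List.pyRange start stop size).Nodup := by
  rw [PySem.List.pyRange_of_pos _ _ h]
  refine List.Nodup.map ?_ (List.nodup_range)
  intro k1 k2 he
  have h2 : size * (k1 : Int) = size * (k2 : Int) := by linarith [he]
  have h3 : (k1 : Int) = (k2 : Int) := mul_left_cancel₀ (by omega) h2
  exact_mod_cast h3

theorem pv_add_le_of_dvd {b stop size : Int} (h1 : b < stop) (h2 : size ∣ stop - b) (h3 : 0 < size) :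
    b + size ≤ stop := by
  obtain ⟨m, hm⟩ := h2
  have hmpos : 0 < m := by nlinarith
  nlinarith

-- b ∈ pyRange start stop size (0 < size, size ∣ start): start ≤ b, b + size ≤ stop, size ∣ b
-- b ∈ pyRange start stop size (0 < size, size ∣ start, size ∣ stop - start): start ≤ b, b + size ≤ stop, size ∣ b
theorem pv_mem_bl {start stop size b : Int} (hsz : 0 < size) (hds : size ∣ start)
    (hde : size ∣ stop - start) (hb : b ∈ PySem.List.pyRange start stop size) :
    start ≤ b ∧ b + size ≤ stop ∧ size ∣ b := by
  rw [PySem.List.mem_pyRange_iff_of_pos hsz] at hb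
  obtain ⟨hle, hlt, hdv⟩ := hb
  have hdb : size ∣ b := by
    have := dvd_add hdv hds
    simpa using this
  have hsb : size ∣ stop - b := by
    have := dvd_sub hde hdv
    have h : stop - start - (b - start) = stop - b := by ring
    rwa [h] at this
  exact ⟨hle, pv_add_le_of_dvd hlt hsb hsz, hdb⟩

-- the bucket of an in-range key y lies in the bucket list
theorem pv_by_mem {start stop size y : Int} (hsz : 0 < size) (hds : size ∣ start)
    (hy1 : start ≤ y) (hy2 : y < stop) :
    PySem.Int.floordiv y size * size ∈ PySem.List.pyRange start stop size := by
  obtain ⟨s', hs'⟩ := hds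
  rw [PySem.List.mem_pyRange_iff_of_pos hsz]
  have hfl : s' ≤ PySem.Int.floordiv y size := by
    rw [PySem.Int.le_floordiv_iff_mul_le hsz]
    calc s' * size = size * s' := by ring
    _ ≤ y := hs' ▸ hy1
  have hlow : start ≤ PySem.Int.floordiv y size * size := by
    calc start = s' * size := by rw [hs']; ring
    _ ≤ PySem.Int.floordiv y size * size := by
        exact mul_le_mul_of_nonneg_right hfl (by omega)
  have hmod := PySem.Int.floordiv_mul_add_mod y size
  have hmn := PySem.Int.mod_nonneg y hsz
  refine ⟨hlow, by linarith, ?_⟩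
  exact dvd_sub (Dvd.intro_left _ rfl) ⟨s', hs'⟩

-- on the bucket list, b is y's bucket iff y lies in [b, b + size)
theorem pv_bucket_iff {size b y : Int} (hsz : 0 < size) (hdb : size ∣ b) :
    b = PySem.Int.floordiv y size * size ↔ (b ≤ y ∧ y < b + size) := by
  obtain ⟨t, ht⟩ := hdb
  have hmod := PySem.Int.floordiv_mul_add_mod y size
  have hmn := PySem.Int.mod_nonneg y hsz
  have hml := PySem.Int.mod_lt y hsz
  constructor
  · intro h; subst h; exact ⟨by linarith, by linarith⟩
  · rintro ⟨h1, h2⟩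
    have : PySem.Int.floordiv y size = t := by
      rw [PySem.Int.floordiv_eq_iff_of_pos hsz]
      constructor
      · calc t * size = size * t := by ring
        _ ≤ y := ht ▸ h1
      · calc y < b + size := h2
        _ = (t + 1) * size := by rw [ht]; ring
    rw [this, ht]; ring

-- B's initial bucket dict
theorem pv_bins0 (start stop size : Int) (hsz : 0 < size) :
    ((PySem.List.pyRange start stop size).foldl
        (fun (d : PySem.Dict Int Int) b => d.insert b 0) PySem.Dict.empty).items =
      (PySem.List.pyRange start stop size).map (fun b => (b, (0 : Int))) := by
  have h := PySem.Dict.items_foldl_insert_fresh (PySem.List.pyRange start stop size)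
      (fun a => a) (fun _ => (0 : Int)) PySem.Dict.empty
      (fun a _ => by simp [PySem.Dict.contains_empty])
      (by simpa using pv_nodup_bl start stop size hsz)
  simpa [PySem.Dict.items] using h

-- B's counting loop: invariant on the items list
theorem pv_loop (start stop size : Int) (hsz : 0 < size) (hds : size ∣ start)
    (hde : size ∣ stop - start) (t : List (Int × Int)) (f : Int → Int) (d : PySem.Dict Int Int)
    (hd : d.items = (PySem.List.pyRange start stop size).map (fun b => (b, f b))) :
    (t.foldl
        (fun (d : PySem.Dict Int Int) p =>
          if start ≤ p.1 ∧ p.1 < stop then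
            d.modify (PySem.Int.floordiv p.1 size * size) 0 (· + p.2)
          else d) d).items =
      (PySem.List.pyRange start stop size).map (fun b => (b, f b + pvS t b size)) := by
  induction t generalizing f d with
  | nil => simpa [pvS] using hd
  | cons p t ih =>
    simp only [List.foldl_cons]
    by_cases hin : start ≤ p.1 ∧ p.1 < stop
    · rw [if_pos hin]
      have hby := pv_by_mem hsz hds hin.1 hin.2
      have hkeys : d.keys = PySem.List.pyRange start stop size := by
        simp only [PySem.Dict.keys, hd, List.map_map]
        simp [Function.comp_def]
      have hcont : d.contains (PySem.Int.floordiv p.1 size * size) = true := by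
        rw [PySem.Dict.contains_iff_mem_keys, hkeys]; exact hby
      have hgetD : d.getD (PySem.Int.floordiv p.1 size * size) 0 =
          f (PySem.Int.floordiv p.1 size * size) := by
        apply PySem.Dict.getD_of_mem_items d _ (by rw [hkeys]; exact pv_nodup_bl start stop size hsz)
        rw [hd]
        exact List.mem_map.mpr ⟨_, hby, rfl⟩
      have hstep : (d.modify (PySem.Int.floordiv p.1 size * size) 0 (· + p.2)).items =
          (PySem.List.pyRange start stop size).map
            (fun b => (b, f b + (if b ≤ p.1 ∧ p.1 < b + size then p.2 else 0))) := by
        show (d.insert (PySem.Int.floordiv p.1 size * size)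
            (d.getD (PySem.Int.floordiv p.1 size * size) 0 + p.2)).items = _
        rw [PySem.Dict.items_insert_of_contains d _ hcont, hgetD, hd, List.map_map]
        apply List.map_congr_left
        intro b hb
        have hdb := (pv_mem_bl hsz hds hde hb).2.2
        simp only [Function.comp_apply]
        by_cases hbe : b = PySem.Int.floordiv p.1 size * size
        · subst hbe
          have hcond := (pv_bucket_iff hsz hdb).mp rfl
          simp [hcond]
        · have hcond : ¬ (b ≤ p.1 ∧ p.1 < b + size) :=
            fun hc => hbe ((pv_bucket_iff hsz hdb).mpr hc)
          have hbeq : (b == PySem.Int.floordiv p.1 size * size) = false := by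
            simp [hbe]
          simp [hbeq, hcond]
      rw [ih _ _ hstep]
      apply List.map_congr_left
      intro b _
      simp only [pvS, List.map_cons, List.sum_cons]
      ring_nf
    · rw [if_neg hin]
      rw [ih _ _ hd]
      apply List.map_congr_left
      intro b hb
      obtain ⟨hb1, hb2, _⟩ := pv_mem_bl hsz hds hde hb
      have hcond : ¬ (b ≤ p.1 ∧ p.1 < b + size) := by
        intro hc
        exact hin ⟨le_trans hb1 hc.1, lt_of_lt_of_le hc.2 hb2⟩
      simp only [pvS, List.map_cons, List.sum_cons, if_neg hcond, zero_add]

-- ===== VERDICT (by name: the statement is the Claim_ definition above) =====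
theorem bucket_counts_spec : Claim_equal_bucket_counts := by
  intro yc size ymin ymax _ hpre
  obtain ⟨hsz, hnd⟩ := hpre
  unfold Spec_bucket_counts
  simp only [bucket_counts, bucket_counts_alt]
  have hszp : (0 : Int) < size := by omega
  set start := PySem.Int.floordiv ymin size * size with hstart
  set stop := (PySem.Int.floordiv ymax size + 1) * size with hstop
  have hds : size ∣ start := Dvd.intro_left _ rfl
  have hde : size ∣ stop - start := dvd_sub (Dvd.intro_left _ rfl) hds
  -- B's bins has items = bl.map (b, pvS yc b size)
  have hbins := pv_loop start stop size hszp hds hde yc (fun _ => 0) _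
      (pv_bins0 start stop size hszp)
  simp only [zero_add] at hbins
  rw [hbins, List.foldl_map]
  -- A's fold computes the same per-bucket values
  have hfun : (fun (bins : PySem.Dict String Int) b =>
        bins.insert (PySem.Int.toStr b ++ "–" ++ PySem.Int.toStr (b + size - 1))
          ((PySem.List.pyRange b (b + size) 1).foldl
            (fun acc y => acc + (PySem.Dict.mk yc).getD y 0) 0)) =
      (fun (bins : PySem.Dict String Int) b =>
        bins.insert (PySem.Int.toStr b ++ "–" ++ PySem.Int.toStr (b + size - 1))
          (pvS yc b size)) := by
    funext bins b
    rw [pv_inner yc hnd b size]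
  rw [hfun]
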